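-- pv_equiv track=rewrite | github.com/Austin-Daigle/CodeCheck-2.0-Python-Research | research.py | findTokens
-- ===== SOURCE A (Python) =====
-- def findTokens(inputA, inputB):
--     identifiedTokens = []
--     for x in range(len(inputA)):
--         for y in range(x+1,len(inputA)+1):
--             subString = inputA[x:y]
--             if subString in inputB:
--                 identifiedTokens.append(subString)
--
--     return list(identifiedTokens)
-- ===== SOURCE B (Python) =====
-- def findTokens(inputA, inputB):
--     identifiedTokens = []
--     n = len(inputA)
--     l = 0  # invariant: inputA[x:x+l] occurs in inputB (matches carry over: L(x+1) >= L(x)-1)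
--     for x in range(n):
--         while x + l < n and inputA[x:x + l + 1] in inputB:
--             l += 1
--         identifiedTokens += [inputA[x:x + t] for t in range(1, l + 1)]
--         if l:
--             l -= 1
--     return identifiedTokens
-- ===== Notes on version B (the rewrite author's own statement) =====
-- stated objective: alternative
-- what changed: Instead of testing every substring inputA[x:y] against inputB with a fresh containment scan, B carries the maximal match length across starts (two-pointer: L(x+1) >= L(x)-1, containment is prefix-closed), extends it with a while loop that stops at the first failure, and emits the matching prefixes of each start in one bulk comprehension.
import Mathlib
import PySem

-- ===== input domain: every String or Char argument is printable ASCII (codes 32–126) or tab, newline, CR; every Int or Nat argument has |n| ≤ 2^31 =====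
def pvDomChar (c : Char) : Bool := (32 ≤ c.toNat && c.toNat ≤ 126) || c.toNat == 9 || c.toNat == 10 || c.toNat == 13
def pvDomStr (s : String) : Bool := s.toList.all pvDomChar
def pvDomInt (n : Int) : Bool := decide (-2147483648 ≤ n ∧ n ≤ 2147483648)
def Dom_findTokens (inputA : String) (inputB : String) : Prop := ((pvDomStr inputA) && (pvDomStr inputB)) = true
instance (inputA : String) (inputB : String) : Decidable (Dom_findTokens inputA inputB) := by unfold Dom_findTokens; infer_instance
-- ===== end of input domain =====

-- B replaces A's per-substring containment scan by a two-pointer scheme: the maximal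
-- match length is carried across starts (containment is prefix-closed) and the matching
-- prefixes of each start are emitted in bulk.

-- ===== PORT A =====
-- for x in range(len(inputA)): for y in range(x+1, len(inputA)+1): if inputA[x:y] in inputB: append
def findTokens (inputA : String) (inputB : String) : List String :=
  let a := inputA.toList
  let b := inputB.toList
  (List.range a.length).foldl (fun acc (x : Nat) =>
    (List.range' (x+1) (a.length - x)).foldl (fun acc (y : Nat) =>
      let subString := PySem.List.slice a (some (x : Int)) (some (y : Int))
      if PySem.Chars.isIn subString b then acc ++ [String.ofList subString] else acc) acc) []

-- ===== PORT B =====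
-- the while loop 'while x + l < n and inputA[x:x+l+1] in inputB: l += 1'
-- (inputA[x:x+t] with 0 ≤ x is exactly (a.drop x).take t, cf. PySem.List.slice_natCast_add)
def pvGrow (a b : List Char) (x l : Nat) : Nat :=
  if x + l < a.length && PySem.Chars.isIn ((a.drop x).take (l+1)) b then
    pvGrow a b x (l+1)
  else l
termination_by a.length - (x + l)
decreasing_by simp_all; omega

def findTokens_alt (inputA : String) (inputB : String) : List String :=
  let a := inputA.toList
  let b := inputB.toList
  let r := (List.range a.length).foldl (fun (st : List String × Nat) (x : Nat) =>
    let l := pvGrow a b x st.2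
    -- 'identifiedTokens += [inputA[x:x+t] for t in range(1, l+1)]'
    let acc := st.1 ++ (List.range' 1 l).map (fun t => String.ofList ((a.drop x).take t))
    (acc, l - 1)) ([], 0)
  r.1

-- ===== PRECONDITION & SPEC =====
def Spec_findTokens (inputA : String) (inputB : String) (out : List String) : Prop := out = findTokens_alt inputA inputB
instance (inputA : String) (inputB : String) (out : List String) : Decidable (Spec_findTokens inputA inputB out) := by unfold Spec_findTokens; infer_instance

-- ===== CLAIM (what is proved, stated in full; the proofs are below) =====
def Claim_equal_findTokens : Prop := ∀ (inputA : String) (inputB : String), Dom_findTokens inputA inputB → Spec_findTokens inputA inputB (findTokens inputA inputB)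

-- ===== LEMMAS AND PROOFS =====

-- the piece inputA[x:x+ℓ]
def pvSub (a : List Char) (x ℓ : Nat) : List Char := (a.drop x).take ℓ

-- occurrence is monotone: if a shorter piece fails, longer ones fail too
lemma pvInfix_mono (a b : List Char) (x ℓ ℓ' : Nat) (h : ℓ ≤ ℓ')
    (hn : ¬ pvSub a x ℓ <:+: b) : ¬ pvSub a x ℓ' <:+: b := by
  intro hc
  have hp : pvSub a x ℓ <+: pvSub a x ℓ' := List.take_prefix_take_left h
  exact hn (hp.isInfix.trans hc)

-- dropping the first character of an occurring piece leaves an occurring piece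
lemma pvInfix_shift (a b : List Char) (x g : Nat) (hg : pvSub a x g <:+: b) :
    pvSub a (x+1) (g-1) <:+: b := by
  have he : pvSub a (x+1) (g-1) = (pvSub a x g).drop 1 := by
    simp only [pvSub, List.drop_take, List.drop_drop]
  rw [he]
  exact (List.drop_suffix 1 _).isInfix.trans hg

lemma pvFoldl_nop (b : List Char) (l : List Nat) (acc : List String) (f : Nat → List Char)
    (h : ∀ y ∈ l, PySem.Chars.isIn (f y) b = false) :
    l.foldl (fun acc y => if PySem.Chars.isIn (f y) b then acc ++ [String.ofList (f y)] else acc) acc = acc := by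
  induction l generalizing acc with
  | nil => rfl
  | cons y t ih =>
    simp only [List.foldl_cons, h y List.mem_cons_self]
    exact ih acc (fun z hz => h z (List.mem_cons_of_mem _ hz))

lemma pvFoldl_all (b : List Char) (l : List Nat) (acc : List String) (f : Nat → List Char)
    (h : ∀ y ∈ l, PySem.Chars.isIn (f y) b = true) :
    l.foldl (fun acc y => if PySem.Chars.isIn (f y) b then acc ++ [String.ofList (f y)] else acc) acc
      = acc ++ l.map (fun y => String.ofList (f y)) := by
  induction l generalizing acc with
  | nil => simp
  | cons y t ih =>
    simp only [List.foldl_cons, h y List.mem_cons_self, if_true, List.map_cons]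
    rw [ih _ (fun z hz => h z (List.mem_cons_of_mem _ hz))]
    simp

-- what the while loop computes: a maximal matching length
lemma pvGrow_spec (a b : List Char) (x l : Nat) (hl : x + l ≤ a.length)
    (hp : pvSub a x l <:+: b) :
    l ≤ pvGrow a b x l ∧ x + pvGrow a b x l ≤ a.length ∧
    pvSub a x (pvGrow a b x l) <:+: b ∧
    (x + pvGrow a b x l = a.length ∨ ¬ pvSub a x (pvGrow a b x l + 1) <:+: b) := by
  rw [pvGrow]
  by_cases hc : x + l < a.length ∧ PySem.Chars.isIn ((a.drop x).take (l+1)) b = true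
  · have hcond : (decide (x + l < a.length) && PySem.Chars.isIn ((a.drop x).take (l+1)) b) = true := by
      simp [hc.1, hc.2]
    rw [hcond, if_pos rfl]
    have hinf : pvSub a x (l+1) <:+: b := (PySem.Chars.isIn_iff_infix _ _).1 hc.2
    obtain ⟨h1, h2, h3, h4⟩ := pvGrow_spec a b x (l+1) (by omega) hinf
    exact ⟨by omega, h2, h3, h4⟩
  · have hne : (decide (x + l < a.length) && PySem.Chars.isIn ((a.drop x).take (l+1)) b) = false := by
      rcases Decidable.not_and_iff_not_or_not.1 hc with h | h
      · simp [h]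
      · simp [Bool.eq_false_iff.2 h]
    rw [hne]
    simp only [Bool.false_eq_true, if_false]
    refine ⟨le_rfl, hl, hp, ?_⟩
    rcases Decidable.not_and_iff_not_or_not.1 hc with h | h
    · left; omega
    · right
      intro hcon
      exact h ((PySem.Chars.isIn_iff_infix _ _).2 hcon)
termination_by a.length - (x + l)
decreasing_by omega

-- A's inner loop appends exactly the prefixes of lengths 1..g
lemma pvInnerA (a b : List Char) (x g : Nat) (acc : List String)
    (hgn : x + g ≤ a.length) (hg : pvSub a x g <:+: b)
    (hstop : x + g = a.length ∨ ¬ pvSub a x (g + 1) <:+: b) :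
    (List.range' (x+1) (a.length - x)).foldl
      (fun acc y => if PySem.Chars.isIn ((a.drop x).take (y - x)) b
        then acc ++ [String.ofList ((a.drop x).take (y - x))] else acc) acc
      = acc ++ (List.range' (x+1) g).map (fun y => String.ofList ((a.drop x).take (y - x))) := by
  have hsplit : List.range' (x+1) (a.length - x) = List.range' (x+1) g ++ List.range' (x+1+g) (a.length - x - g) := by
    obtain ⟨k, hk⟩ : ∃ k, a.length - x - g = k := ⟨_, rfl⟩
    rw [hk, show a.length - x = g + k from by omega]
    exact Eq.symm List.range'_append_1
  have h1 : ∀ y ∈ List.range' (x+1) g,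
      PySem.Chars.isIn ((a.drop x).take (y - x)) b = true := by
    intro y hy
    obtain ⟨hy1, hy2⟩ := List.mem_range'_1.mp hy
    apply (PySem.Chars.isIn_iff_infix _ _).2
    by_contra hcon
    exact pvInfix_mono a b x (y - x) g (by omega) hcon hg
  have h2 : ∀ y ∈ List.range' (x+1+g) (a.length - x - g),
      PySem.Chars.isIn ((a.drop x).take (y - x)) b = false := by
    intro y hy
    obtain ⟨hy1, hy2⟩ := List.mem_range'_1.mp hy
    rcases hstop with h | h
    · omega
    · exact (PySem.Chars.isIn_eq_false_iff _ _).2 (pvInfix_mono a b x (g+1) (y - x) (by omega) h)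
  rw [hsplit, List.foldl_append, pvFoldl_all b _ acc _ h1]
  exact pvFoldl_nop b _ _ _ h2

-- the outer loops agree, carrying B's state invariant
lemma pvOuter (a b : List Char) :
    ∀ cnt x (acc : List String) (prev : Nat), x + cnt = a.length →
    x + prev ≤ a.length → pvSub a x prev <:+: b →
    (List.range' x cnt).foldl (fun acc (x : Nat) =>
      (List.range' (x+1) (a.length - x)).foldl (fun acc (y : Nat) =>
        if PySem.Chars.isIn ((a.drop x).take (y - x)) b
        then acc ++ [String.ofList ((a.drop x).take (y - x))] else acc) acc) acc
    = ((List.range' x cnt).foldl (fun (st : List String × Nat) (x : Nat) =>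
        let l := pvGrow a b x st.2
        let acc := st.1 ++ (List.range' 1 l).map (fun t => String.ofList ((a.drop x).take t))
        (acc, l - 1)) (acc, prev)).1 := by
  intro cnt
  induction cnt with
  | zero => intro x acc prev _ _ _; rfl
  | succ cnt ih =>
    intro x acc prev hxc hxp hprev
    rw [List.range'_succ, List.foldl_cons, List.foldl_cons]
    obtain ⟨hle, hgn, hg, hstop⟩ := pvGrow_spec a b x prev hxp hprev
    set g := pvGrow a b x prev with hgdef
    have hA := pvInnerA a b x g acc hgn hg hstop
    have hmaps : (List.range' (x+1) g).map (fun y => String.ofList ((a.drop x).take (y - x)))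
        = (List.range' 1 g).map (fun t => String.ofList ((a.drop x).take t)) := by
      rw [← List.map_add_range' 1 g 1, List.map_map]
      apply List.map_congr_left
      intro t _
      simp only [Function.comp]
      congr 2
      omega
    rw [hA, hmaps]
    by_cases hg0 : g = 0
    · exact ih (x+1) _ (g-1) (by omega) (by omega) (by simp [hg0, pvSub, List.nil_infix])
    · exact ih (x+1) _ (g-1) (by omega) (by omega) (pvInfix_shift a b x g hg)

-- ===== VERDICT (by name: the statement is the Claim_ definition above) =====
theorem findTokens_spec : Claim_equal_findTokens := by
  intro inputA inputB _
  unfold Spec_findTokens findTokens findTokens_alt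
  have hslice : ∀ x y : Nat, PySem.List.slice inputA.toList (some (x : Int)) (some (y : Int))
      = (inputA.toList.drop x).take (y - x) := fun x y => PySem.List.slice_natCast _ _ _
  simp only [hslice]
  rw [List.range_eq_range']
  exact pvOuter inputA.toList inputB.toList inputA.toList.length 0 [] 0 (by omega) (by omega)
    (by simp [pvSub, List.nil_infix])
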